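-- pv_equiv track=rewrite | github.com/Shanyao-HEU/PTA-PAT | pat-b/1055.py | sortRule2
-- ===== SOURCE A (Python) =====
-- def sortRule2(stu_lst):
--     sort_stu_lst = []
--     i = 0
--     stu_lst.reverse()
--     while stu_lst:
--         max_hei = stu_lst.pop(0)
--         if i % 2 == 0:
--             sort_stu_lst.append(max_hei)
--             i += 1
--         else:
--             sort_stu_lst.insert(0, max_hei)
--             i += 1
--     sort_stu_lst = " ".join([stu[0] for stu in sort_stu_lst])
--     return sort_stu_lst
-- ===== SOURCE B (Python) =====
-- def sortRule2(stu_lst):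
--     front, back = [], []
--     flip = len(stu_lst) % 2 == 1
--     for stu in stu_lst:
--         if flip:
--             back.append(stu[0])
--         else:
--             front.append(stu[0])
--         flip = not flip
--     return " ".join(front + back[::-1])
-- ===== Notes on version B (the rewrite author's own statement) =====
-- stated objective: alternative
-- what changed: Replaces A's in-place reverse plus repeated pop(0)/insert(0) shuffling by a single forward pass that routes each name into a front or back list via an alternating flag and concatenates front + reversed back (linear-time vs quadratic list edits, though CPython's memmove makes A fast in practice).
import Mathlib
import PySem

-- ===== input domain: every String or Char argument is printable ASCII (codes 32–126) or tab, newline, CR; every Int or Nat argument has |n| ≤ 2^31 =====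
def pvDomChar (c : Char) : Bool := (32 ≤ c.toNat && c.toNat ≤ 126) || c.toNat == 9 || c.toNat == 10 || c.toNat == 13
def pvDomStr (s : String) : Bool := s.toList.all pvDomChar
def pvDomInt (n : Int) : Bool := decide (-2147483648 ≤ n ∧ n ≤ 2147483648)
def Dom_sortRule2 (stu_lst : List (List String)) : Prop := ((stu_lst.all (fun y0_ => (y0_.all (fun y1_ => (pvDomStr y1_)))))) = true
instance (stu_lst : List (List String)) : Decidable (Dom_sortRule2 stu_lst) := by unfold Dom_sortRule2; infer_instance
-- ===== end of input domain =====

-- B replaces A's in-place reverse plus pop(0)/insert(0) shuffle by a single forward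
-- pass that routes each name to a front or back list via an alternating flag
-- (alternative decomposition; not measurably faster). A mutates stu_lst in place
-- (reverses and empties it), B does not: the equivalence proved here is about the
-- RETURN value only.

-- ===== PORT A =====
-- A's while loop: pop from the front of the reversed list; even step → append to the
-- back of the accumulator, odd step → insert at position 0.
def pvALoop (xs : List (List String)) (i : Nat) (acc : List (List String)) : List (List String) :=
  match xs with
  | [] => acc
  | x :: rest =>
      if i % 2 = 0 then pvALoop rest (i + 1) (acc ++ [x])
      else pvALoop rest (i + 1) (x :: acc)

def sortRule2 (stu_lst : List (List String)) : String :=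
  PySem.Str.join " " ((pvALoop stu_lst.reverse 0 []).map (fun stu => PySem.List.pyGetD stu 0 ""))

-- ===== PORT B =====
-- B's for loop: state (front, back, flip); flip starts as (len % 2 == 1) and toggles.
def pvBLoop (xs : List (List String)) (front back : List String) (flip : Bool) : List String × List String :=
  match xs with
  | [] => (front, back)
  | stu :: rest =>
      if flip then pvBLoop rest front (back ++ [PySem.List.pyGetD stu 0 ""]) (!flip)
      else pvBLoop rest (front ++ [PySem.List.pyGetD stu 0 ""]) back (!flip)

def sortRule2_alt (stu_lst : List (List String)) : String :=
  let p := pvBLoop stu_lst [] [] (stu_lst.length % 2 == 1)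
  PySem.Str.join " " (p.1 ++ p.2.reverse)

-- ===== PRECONDITION & SPEC =====
-- Pre_ excludes inputs containing an empty inner list, on which both Pythons raise IndexError at stu[0].
def Pre_sortRule2 (stu_lst : List (List String)) : Prop := ∀ stu ∈ stu_lst, stu ≠ []
instance (stu_lst : List (List String)) : Decidable (Pre_sortRule2 stu_lst) := by unfold Pre_sortRule2; infer_instance

def pvWitness_sortRule2 : List (List String) := [["Alice", "170"], ["Bob", "165"], ["Eve", "180"]]

def Spec_sortRule2 (stu_lst : List (List String)) (out : String) : Prop := out = sortRule2_alt stu_lst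
instance (stu_lst : List (List String)) (out : String) : Decidable (Spec_sortRule2 stu_lst out) := by unfold Spec_sortRule2; infer_instance

-- ===== CLAIM (what is proved, stated in full; the proofs are below) =====
def Claim_equal_sortRule2 : Prop := ∀ (stu_lst : List (List String)), Dom_sortRule2 stu_lst → Pre_sortRule2 stu_lst → Spec_sortRule2 stu_lst (sortRule2 stu_lst)

-- ===== LEMMAS AND PROOFS =====

-- elements at even (b = true) resp. odd (b = false) positions
def pvEO {α : Type} (b : Bool) : List α → List α
  | [] => []
  | x :: xs => if b then x :: pvEO false xs else pvEO true xs

theorem pvEO_append_singleton {α : Type} (ys : List α) (x : α) (b : Bool) :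
    pvEO b (ys ++ [x]) = pvEO b ys ++ (if (decide (ys.length % 2 = 0)) == b then [x] else []) := by
  induction ys generalizing b with
  | nil => cases b <;> simp [pvEO]
  | cons y ys ih =>
      cases b <;>
        simp [pvEO, ih, show (ys.length + 1) % 2 = 0 ↔ ¬ ys.length % 2 = 0 by omega]

theorem pvEO_reverse {α : Type} (xs : List α) (b : Bool) :
    pvEO b xs.reverse = (pvEO (if xs.length % 2 = 1 then b else !b) xs).reverse := by
  induction xs generalizing b with
  | nil => simp [pvEO]
  | cons x xs ih =>
      rw [List.reverse_cons, pvEO_append_singleton, ih]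
      by_cases h : xs.length % 2 = 0 <;> cases b <;>
        simp [pvEO, h, List.length_reverse, Nat.succ_mod_two_eq_one_iff,
          show xs.length % 2 = 1 ↔ ¬ xs.length % 2 = 0 by omega]

theorem pvALoop_eq (xs : List (List String)) (i : Nat) (acc : List (List String)) :
    pvALoop xs i acc =
      if i % 2 = 0 then (pvEO false xs).reverse ++ acc ++ pvEO true xs
      else (pvEO true xs).reverse ++ acc ++ pvEO false xs := by
  induction xs generalizing i acc with
  | nil => simp [pvALoop, pvEO]
  | cons x xs ih =>
      by_cases h : i % 2 = 0 <;>
        simp [pvALoop, h, ih, show (i+1) % 2 = 0 ↔ ¬ i % 2 = 0 by omega, pvEO]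

theorem pvBLoop_eq (xs : List (List String)) (front back : List String) (flip : Bool) :
    pvBLoop xs front back flip =
      (front ++ (pvEO (!flip) xs).map (fun stu => PySem.List.pyGetD stu 0 ""),
       back ++ (pvEO flip xs).map (fun stu => PySem.List.pyGetD stu 0 "")) := by
  induction xs generalizing front back flip with
  | nil => simp [pvBLoop, pvEO]
  | cons x xs ih => cases flip <;> simp [pvBLoop, ih, pvEO]

-- ===== VERDICT (by name: the statement is the Claim_ definition above) =====
theorem sortRule2_spec : Claim_equal_sortRule2 := by
  intro l _ _
  unfold Spec_sortRule2 sortRule2 sortRule2_alt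
  rw [pvALoop_eq, pvBLoop_eq]
  simp only [List.nil_append, List.append_nil]
  rw [pvEO_reverse, pvEO_reverse]
  by_cases h : l.length % 2 = 1
  · simp [h, List.map_append]
  · have h0 : l.length % 2 = 0 := by omega
    simp [h0, List.map_append]
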